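-- pv_equiv track=rewrite | github.com/pypi-data/pypi-mirror-175 | packages/pandem-source/pandem_source-1.1.0-py3-none-any.whl/pandemsource/aggregator.py | rel_descendants
-- ===== SOURCE A (Python) =====
-- def rel_descendants(rel, desc = {}):
--   if len(desc) == 0:
--     desc = {c:{c} for c, p in rel.items()}
--   added = True
--   while added:
--     added = False
--     for e, dd in desc.items():
--       for c, p in rel.items():
--         if p in dd and c not in desc[e]:
--           desc[e].add(c)
--           added = True
--   return desc
-- ===== SOURCE B (Python) =====
-- def rel_descendants(rel, desc = {}):
--   if len(desc) == 0:
--     desc = {c: {c} for c in rel}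
--   items = list(rel.items())
--   out = {}
--   for e, dd in desc.items():
--     # saturate this key's set on its own: keep a worklist of the relation
--     # entries that could still fire, drop an entry for good once it has fired
--     # or its child is already present, and stop once a pass adds nothing
--     s = set(dd)
--     pending = [cp for cp in items if cp[0] not in s]
--     added = True
--     while added:
--       added = False
--       kept = []
--       for c, p in pending:
--         if c in s:
--           continue
--         if p in s:
--           s.add(c)
--           added = True
--         else:
--           kept.append((c, p))
--       pending = kept
--     out[e] = s
--   return out
-- ===== Notes on version B (the rewrite author's own statement) =====
-- stated objective: alternative
-- what changed: A runs one global fixed-point loop that re-scans every key's set against the entire relation until no set anywhere changes; B saturates each key's set independently, iterating a shrinking worklist from which fired and already-present relation entries are permanently dropped, and stops per key as soon as a pass adds nothing.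
import Mathlib
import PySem

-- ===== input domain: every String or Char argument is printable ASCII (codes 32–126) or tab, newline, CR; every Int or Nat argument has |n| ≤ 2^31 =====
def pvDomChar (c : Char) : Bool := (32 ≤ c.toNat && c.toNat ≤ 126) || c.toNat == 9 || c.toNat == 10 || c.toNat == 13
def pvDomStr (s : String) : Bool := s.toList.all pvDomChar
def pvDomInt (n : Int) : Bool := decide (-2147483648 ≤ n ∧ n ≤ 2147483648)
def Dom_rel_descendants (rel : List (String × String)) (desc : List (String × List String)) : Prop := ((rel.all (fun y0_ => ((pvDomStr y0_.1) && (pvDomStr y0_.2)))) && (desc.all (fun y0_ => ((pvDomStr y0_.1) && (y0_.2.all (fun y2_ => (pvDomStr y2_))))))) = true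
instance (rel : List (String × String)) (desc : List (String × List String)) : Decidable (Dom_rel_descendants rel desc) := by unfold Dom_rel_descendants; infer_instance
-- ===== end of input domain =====

-- B replaces A's global fixed-point loop (which re-scans every key's set against the
-- whole relation until no set anywhere changes) by an independent per-key saturation
-- over a shrinking worklist (a genuinely different decomposition, not claimed faster).
-- Equivalence is about the RETURN value: Python A mutates the sets of a non-empty `desc`
-- argument in place (and returns that same dict); B builds a fresh dict.

-- ===== PORT A =====

-- one inner `for c, p in rel.items():` pass of A over a single entry's set `s`
-- (`s` is a Python set = PySem.Set, grown in insertion order); returns the grown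
-- set and whether the `added = True` line fired during this pass over this set.
def pvPassA (s : List String) : List (String × String) → List String × Bool
  | [] => (s, false)
  | (c, p) :: rest =>
      if p ∈ s ∧ c ∉ s then ((pvPassA (PySem.Set.add s c) rest).1, true)
      else pvPassA s rest

-- one iteration of A's `while added:` body: `for e, dd in desc.items():` — each
-- entry's set is scanned against rel (entries are independent: dd IS desc[e]);
-- the Bool is the accumulated `added` flag.
def pvPassAllA (rel : List (String × String)) : List (String × List String) → List (String × List String) × Bool
  | [] => ([], false)
  | (e, dd) :: rest =>
      let r := pvPassA dd rel
      let rs := pvPassAllA rel rest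
      ((e, r.1) :: rs.1, r.2 || rs.2)

-- termination measure for A's while-loop: how many distinct relation keys are
-- still missing from each entry's set, summed over the entries.
def pvCnt (rel : List (String × String)) (s : List String) : Nat :=
  (((rel.map Prod.fst).dedup).filter (fun c => decide (c ∉ s))).length

def pvPot (rel : List (String × String)) (d : List (String × List String)) : Nat :=
  (d.map (fun es => pvCnt rel es.2)).sum

-- a pass only appends, and appends only keys of rel that were absent
theorem pvPassA_grow (l : List (String × String)) (s : List String) :
    ∃ t, pvPassA s l = (s ++ t, !t.isEmpty) ∧ ∀ c ∈ t, c ∈ l.map Prod.fst ∧ c ∉ s := by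
  induction l generalizing s with
  | nil => exact ⟨[], by simp [pvPassA]⟩
  | cons cp rest ih =>
    obtain ⟨c, p⟩ := cp
    by_cases h : p ∈ s ∧ c ∉ s
    · have hadd : PySem.Set.add s c = s ++ [c] := PySem.Set.add_of_not_mem h.2
      obtain ⟨t', ht', hmem⟩ := ih (PySem.Set.add s c)
      refine ⟨c :: t', ?_, ?_⟩
      · rw [hadd] at ht'
        simp only [pvPassA, if_pos h, hadd, ht']
        simp
      · intro x hx
        rcases List.mem_cons.mp hx with rfl | hx'
        · exact ⟨by simp, h.2⟩
        · have h12 := hmem x hx'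
          rw [hadd] at h12
          exact ⟨by simp [h12.1], fun hs => h12.2 (by simp [hs])⟩
    · obtain ⟨t, ht, hmem⟩ := ih s
      refine ⟨t, by simp [pvPassA, h, ht], fun x hx => ⟨by simp [(hmem x hx).1], (hmem x hx).2⟩⟩

theorem pvFilter_length_le {α : Type} (l : List α) (p q : α → Bool)
    (h : ∀ a, q a = true → p a = true) : (l.filter q).length ≤ (l.filter p).length := by
  induction l with
  | nil => simp
  | cons x xs ih =>
    by_cases hq : q x = true
    · simp [hq, h x hq]; omega
    · simp only [List.filter_cons, hq]
      by_cases hp : p x = true <;> simp [hp] <;> omega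

theorem pvFilter_length_lt {α : Type} (l : List α) (p q : α → Bool)
    (h : ∀ a, q a = true → p a = true) (c : α) (hc : c ∈ l)
    (hp : p c = true) (hq : q c = false) :
    (l.filter q).length < (l.filter p).length := by
  induction l with
  | nil => simp at hc
  | cons x xs ih =>
    rcases List.mem_cons.mp hc with rfl | hc
    · simp only [List.filter_cons, hq, hp]
      simpa using Nat.lt_succ_of_le (pvFilter_length_le xs p q h)
    · have := ih hc
      by_cases hqx : q x = true
      · simp [hqx, h x hqx]; omega
      · simp only [List.filter_cons, hqx]
        by_cases hpx : p x = true <;> simp [hpx] <;> omega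

theorem pvCnt_append_le (rel : List (String × String)) (s t : List String) :
    pvCnt rel (s ++ t) ≤ pvCnt rel s := by
  unfold pvCnt
  apply pvFilter_length_le
  intro a ha
  simp only [decide_eq_true_eq] at *
  exact fun h => ha (by simp [h])

theorem pvCnt_append_lt (rel : List (String × String)) (s t : List String)
    (hne : t ≠ []) (hmem : ∀ c ∈ t, c ∈ rel.map Prod.fst ∧ c ∉ s) :
    pvCnt rel (s ++ t) < pvCnt rel s := by
  obtain ⟨c0, t', rfl⟩ := List.exists_cons_of_ne_nil hne
  have h0 := hmem c0 (by simp)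
  unfold pvCnt
  refine pvFilter_length_lt _ (fun c => decide (c ∉ s)) (fun c => decide (c ∉ s ++ c0 :: t')) ?_ c0 ?_ ?_ ?_
  · intro a ha
    simp only [decide_eq_true_eq] at *
    exact fun hmem' => ha (by simp [hmem'])
  · exact List.mem_dedup.mpr h0.1
  · simpa using h0.2
  · simp

theorem pvPassAllA_eq (rel : List (String × String)) (d : List (String × List String)) :
    pvPassAllA rel d = (d.map (fun es => (es.1, (pvPassA es.2 rel).1)),
                        d.any (fun es => (pvPassA es.2 rel).2)) := by
  induction d with
  | nil => rfl
  | cons es rest ih => obtain ⟨e, dd⟩ := es; simp [pvPassAllA, ih]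

theorem pvPot_le (rel : List (String × String)) (d : List (String × List String)) :
    pvPot rel (d.map (fun es => (es.1, (pvPassA es.2 rel).1))) ≤ pvPot rel d := by
  induction d with
  | nil => simp [pvPot]
  | cons es rest ih =>
    have hcnt : pvCnt rel (pvPassA es.2 rel).1 ≤ pvCnt rel es.2 := by
      obtain ⟨t, ht, _⟩ := pvPassA_grow rel es.2
      rw [ht]; exact pvCnt_append_le rel es.2 t
    have ih' : (List.map (fun es => pvCnt rel es.2)
        (List.map (fun es => (es.1, (pvPassA es.2 rel).1)) rest)).sum ≤
        (List.map (fun es => pvCnt rel es.2) rest).sum := ih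
    simp only [pvPot, List.map_cons, List.sum_cons]
    omega

theorem pvPot_lt (rel : List (String × String)) (d d' : List (String × List String))
    (h : pvPassAllA rel d = (d', true)) : pvPot rel d' < pvPot rel d := by
  rw [pvPassAllA_eq] at h
  have hd' : List.map (fun es => (es.1, (pvPassA es.2 rel).1)) d = d' := congrArg Prod.fst h
  have hany : d.any (fun es => (pvPassA es.2 rel).2) = true := congrArg Prod.snd h
  rw [← hd']
  clear h hd'
  induction d with
  | nil => simp at hany
  | cons es rest ih =>
    obtain ⟨t, ht, hmem⟩ := pvPassA_grow rel es.2
    simp only [List.any_cons, Bool.or_eq_true] at hany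
    simp only [pvPot, List.map_cons, List.sum_cons]
    rcases hany with hflag | hrest
    · have htne : t ≠ [] := by
        intro h0
        rw [h0] at ht
        rw [ht] at hflag
        simp at hflag
      have hlt : pvCnt rel (pvPassA es.2 rel).1 < pvCnt rel es.2 := by
        rw [ht]; exact pvCnt_append_lt rel es.2 t htne hmem
      have hle : pvPot rel (rest.map (fun es => (es.1, (pvPassA es.2 rel).1))) ≤ pvPot rel rest :=
        pvPot_le rel rest
      simp only [pvPot] at hle
      omega
    · have hih := ih hrest
      simp only [pvPot] at hih ⊢
      have hle : pvCnt rel (pvPassA es.2 rel).1 ≤ pvCnt rel es.2 := by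
        rw [ht]; exact pvCnt_append_le rel es.2 t
      omega

-- A's `while added:` loop (terminates: each productive global pass strictly
-- shrinks pvPot, the number of still-missing (entry, relation-key) pairs).
def pvLoopA (rel : List (String × String)) (d : List (String × List String)) : List (String × List String) :=
  match h : pvPassAllA rel d with
  | (d', true) => pvLoopA rel d'
  | (d', false) => d'
termination_by pvPot rel d
decreasing_by exact pvPot_lt rel d d' h

def rel_descendants (rel : List (String × String)) (desc : List (String × List String)) : List (String × List String) :=
  -- `if len(desc) == 0: desc = {c:{c} for c, p in rel.items()}` (rel is a dict: unique keys)
  let d0 := if desc.isEmpty then rel.map (fun cp => (cp.1, [cp.1])) else desc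
  pvLoopA rel d0

-- ===== PORT B =====

-- one `for c, p in pending:` pass of B over one set `s` and its worklist;
-- returns (grown set, kept worklist, added flag).
def pvPassB (s : List String) : List (String × String) → List String × List (String × String) × Bool
  | [] => (s, [], false)
  | (c, p) :: rest =>
      if c ∈ s then pvPassB s rest
      else if p ∈ s then
        ((pvPassB (PySem.Set.add s c) rest).1, (pvPassB (PySem.Set.add s c) rest).2.1, true)
      else
        ((pvPassB s rest).1, (c, p) :: (pvPassB s rest).2.1, (pvPassB s rest).2.2)

-- the kept worklist never grows, and shrinks strictly whenever something was added
theorem pvPassB_len (l : List (String × String)) (s : List String) :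
    (pvPassB s l).2.1.length ≤ l.length ∧
    ((pvPassB s l).2.2 = true → (pvPassB s l).2.1.length < l.length) := by
  induction l generalizing s with
  | nil => simp [pvPassB]
  | cons cp rest ih =>
    obtain ⟨c, p⟩ := cp
    by_cases hc : c ∈ s
    · have h1 := (ih s).1
      have h2 := (ih s).2
      simp only [pvPassB, if_pos hc, List.length_cons]
      exact ⟨by omega, fun hf => by have := h2 hf; omega⟩
    · by_cases hp : p ∈ s
      · have h1 := (ih (PySem.Set.add s c)).1
        simp only [pvPassB, if_neg hc, if_pos hp, List.length_cons]
        exact ⟨by omega, fun _ => by omega⟩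
      · have h1 := (ih s).1
        have h2 := (ih s).2
        simp only [pvPassB, if_neg hc, if_neg hp, List.length_cons]
        exact ⟨by omega, fun hf => by have := h2 hf; omega⟩

-- B's per-key `while added:` loop (terminates: the worklist shrinks on every
-- productive pass).
def pvSatB (s : List String) (pending : List (String × String)) : List String :=
  match h : pvPassB s pending with
  | (s', pending', true) => pvSatB s' pending'
  | (s', _, false) => s'
termination_by pending.length
decreasing_by
  have hlen := (pvPassB_len pending s).2
  rw [h] at hlen
  exact hlen rfl

def rel_descendants_alt (rel : List (String × String)) (desc : List (String × List String)) : List (String × List String) :=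
  -- same `{c: {c} for c in rel}` comprehension as A (rel is a dict: unique keys);
  -- `items = list(rel.items())` is rel itself.
  let d0 := if desc.isEmpty then rel.map (fun cp => (cp.1, [cp.1])) else desc
  -- `out = {}` then `out[e] = s` per key of desc (unique keys): a map over the entries;
  -- `s = set(dd)` copies the set dd — the identity on its value.
  d0.map (fun es =>
    let pending := rel.filter (fun cp => !decide (cp.1 ∈ es.2))
    (es.1, pvSatB es.2 pending))

-- ===== PRECONDITION & SPEC =====
def Spec_rel_descendants (rel : List (String × String)) (desc : List (String × List String)) (out : List (String × List String)) : Prop := out = rel_descendants_alt rel desc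
instance (rel : List (String × String)) (desc : List (String × List String)) (out : List (String × List String)) : Decidable (Spec_rel_descendants rel desc out) := by unfold Spec_rel_descendants; infer_instance

-- ===== CLAIM (what is proved, stated in full; the proofs are below) =====
def Claim_equal_rel_descendants : Prop := ∀ (rel : List (String × String)) (desc : List (String × List String)), Dom_rel_descendants rel desc → Spec_rel_descendants rel desc (rel_descendants rel desc)

-- ===== LEMMAS AND PROOFS =====

-- proof-side: saturate a SINGLE set by repeated full passes over rel — the
-- per-entry meaning of A's global loop.
def pvSatF (rel : List (String × String)) (s : List String) : List String :=
  match h : pvPassA s rel with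
  | (s', true) => pvSatF rel s'
  | (s', false) => s'
termination_by pvCnt rel s
decreasing_by
  obtain ⟨t, ht, hmem⟩ := pvPassA_grow rel s
  rw [h] at ht
  have h1 : s' = s ++ t := congrArg Prod.fst ht
  have h2 : true = !t.isEmpty := congrArg Prod.snd ht
  have htne : t ≠ [] := by intro h0; rw [h0] at h2; simp at h2
  rw [h1]
  exact pvCnt_append_lt rel s t htne hmem

theorem pvSatF_of_true (rel : List (String × String)) (s s' : List String)
    (h : pvPassA s rel = (s', true)) : pvSatF rel s = pvSatF rel s' := by
  rw [pvSatF.eq_def]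
  split <;> rename_i h' <;> rw [h] at h' <;> simp_all

theorem pvSatF_of_false (rel : List (String × String)) (s s' : List String)
    (h : pvPassA s rel = (s', false)) : pvSatF rel s = s' := by
  rw [pvSatF.eq_def]
  split <;> rename_i h' <;> rw [h] at h' <;> simp_all

theorem pvSatB_of_true (s s' : List String) (rem rem' : List (String × String))
    (h : pvPassB s rem = (s', rem', true)) : pvSatB s rem = pvSatB s' rem' := by
  rw [pvSatB.eq_def]
  split <;> rename_i h' <;> rw [h] at h' <;> simp_all

theorem pvSatB_of_false (s s' : List String) (rem rem' : List (String × String))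
    (h : pvPassB s rem = (s', rem', false)) : pvSatB s rem = s' := by
  rw [pvSatB.eq_def]
  split <;> rename_i h' <;> rw [h] at h' <;> simp_all

-- if A's pass over an entry added nothing, the entry's set is unchanged
theorem pvPassA_false (rel : List (String × String)) (s : List String)
    (h : (pvPassA s rel).2 = false) : (pvPassA s rel).1 = s := by
  obtain ⟨t, ht, _⟩ := pvPassA_grow rel s
  rw [ht] at h ⊢
  rcases t with _ | _
  · simp
  · simp at h

-- per-entry: one application of A's pass does not change the saturation
theorem pvSatF_pass (rel : List (String × String)) (s : List String) :
    pvSatF rel (pvPassA s rel).1 = pvSatF rel s := by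
  rcases hf : pvPassA s rel with ⟨s', flag⟩
  rcases flag with _ | _
  · have hs : s' = s := by
      have h0 := pvPassA_false rel s (by rw [hf])
      rw [hf] at h0; exact h0
    simp [hs]
  · simpa using (pvSatF_of_true rel s s' hf).symm

-- A's whole loop = the per-entry saturation pvSatF, entry by entry
theorem pvLoopA_eq (rel : List (String × String)) :
    ∀ (n : Nat) (d : List (String × List String)), pvPot rel d ≤ n →
    pvLoopA rel d = d.map (fun es => (es.1, pvSatF rel es.2)) := by
  intro n
  induction n with
  | zero =>
    intro d hle
    rw [pvLoopA.eq_def]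
    split <;> rename_i d' h
    · exfalso; have := pvPot_lt rel d d' h; omega
    · rw [pvPassAllA_eq] at h
      have hd' : List.map (fun es => (es.1, (pvPassA es.2 rel).1)) d = d' := congrArg Prod.fst h
      have hany : d.any (fun es => (pvPassA es.2 rel).2) = false := by
        have := congrArg Prod.snd h; simpa using this
      rw [← hd']
      apply List.map_congr_left
      intro es hes
      have hflag : (pvPassA es.2 rel).2 = false := by
        by_contra hne
        rw [List.any_eq_false] at hany
        exact hany es hes (by simpa using hne)
      have hs := pvPassA_false rel es.2 hflag
      have heq : pvPassA es.2 rel = ((pvPassA es.2 rel).1, false) := by rw [← hflag]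
      have hsat := pvSatF_of_false rel es.2 (pvPassA es.2 rel).1 heq
      rw [hs, hsat, hs]
  | succ n ihn =>
    intro d hle
    rw [pvLoopA.eq_def]
    split <;> rename_i d' h
    · have hlt := pvPot_lt rel d d' h
      have hih := ihn d' (by omega)
      rw [hih]
      rw [pvPassAllA_eq] at h
      have hd' : List.map (fun es => (es.1, (pvPassA es.2 rel).1)) d = d' := congrArg Prod.fst h
      rw [← hd', List.map_map]
      apply List.map_congr_left
      intro es _
      simp only [Function.comp_apply]
      rw [pvSatF_pass rel es.2]
    · rw [pvPassAllA_eq] at h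
      have hd' : List.map (fun es => (es.1, (pvPassA es.2 rel).1)) d = d' := congrArg Prod.fst h
      have hany : d.any (fun es => (pvPassA es.2 rel).2) = false := by
        have := congrArg Prod.snd h; simpa using this
      rw [← hd']
      apply List.map_congr_left
      intro es hes
      have hflag : (pvPassA es.2 rel).2 = false := by
        by_contra hne
        rw [List.any_eq_false] at hany
        exact hany es hes (by simpa using hne)
      have hs := pvPassA_false rel es.2 hflag
      have heq : pvPassA es.2 rel = ((pvPassA es.2 rel).1, false) := by rw [← hflag]
      have hsat := pvSatF_of_false rel es.2 (pvPassA es.2 rel).1 heq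
      rw [hs, hsat, hs]

-- B's worklist as a view of `rel`: the worklist is `rel` with some entries
-- removed whose child is already in `s`.
inductive pvRem : List String → List (String × String) → List (String × String) → Prop
  | nil (s : List String) : pvRem s [] []
  | keep (s : List String) (c p : String) (l r : List (String × String)) :
      pvRem s l r → pvRem s ((c, p) :: l) ((c, p) :: r)
  | dropMem (s : List String) (c p : String) (l r : List (String × String)) :
      c ∈ s → pvRem s l r → pvRem s ((c, p) :: l) r

theorem pvRem_mono (s s' : List String) (l r : List (String × String))
    (h : pvRem s l r) (hsub : ∀ x ∈ s, x ∈ s') : pvRem s' l r := by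
  induction h with
  | nil => exact pvRem.nil s'
  | keep c p l r hprev ih => exact pvRem.keep s' c p l r ih
  | dropMem c p l r hc hprev ih => exact pvRem.dropMem s' c p l r (hsub _ hc) ih

-- B's initial pruned worklist is such a view
theorem pvRem_filter (s : List String) :
    ∀ l : List (String × String), pvRem s l (l.filter (fun cp => !decide (cp.1 ∈ s))) := by
  intro l
  induction l with
  | nil => exact pvRem.nil s
  | cons cp rest ih =>
    obtain ⟨c, p⟩ := cp
    by_cases hcs : c ∈ s
    · simp only [List.filter_cons]
      rw [if_neg (by simp [hcs])]
      exact pvRem.dropMem s c p rest _ hcs ih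
    · simp only [List.filter_cons]
      rw [if_pos (by simp [hcs])]
      exact pvRem.keep s c p rest _ ih

theorem pvPassA_mem (rel : List (String × String)) (s : List String) (x : String)
    (hx : x ∈ s) : x ∈ (pvPassA s rel).1 := by
  obtain ⟨t, ht, _⟩ := pvPassA_grow rel s
  rw [ht]; simp [hx]

-- one pass of B over its worklist = one pass of A over all of rel:
-- same resulting set, same added flag, and the kept worklist is again a view.
theorem pvPassAgree (l : List (String × String)) :
    ∀ (r : List (String × String)) (s : List String), pvRem s l r →
    (pvPassB s r).1 = (pvPassA s l).1 ∧ (pvPassB s r).2.2 = (pvPassA s l).2 ∧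
    pvRem (pvPassA s l).1 l (pvPassB s r).2.1 := by
  induction l with
  | nil =>
    intro r s h
    cases h
    exact ⟨rfl, rfl, pvRem.nil s⟩
  | cons cp rest ih =>
    intro r s h
    obtain ⟨c, p⟩ := cp
    cases h with
    | keep =>
      rename_i r' hrem
      by_cases hc : c ∈ s
      · have hA : pvPassA s ((c, p) :: rest) = pvPassA s rest := by
          have : ¬ (p ∈ s ∧ c ∉ s) := fun hh => hh.2 hc
          simp [pvPassA, this]
        have hB : pvPassB s ((c, p) :: r') = pvPassB s r' := by
          simp [pvPassB, hc]
        obtain ⟨h1, h2, h3⟩ := ih r' s hrem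
        rw [hA, hB]
        exact ⟨h1, h2, pvRem.dropMem _ c p rest _ (pvPassA_mem rest s c hc) h3⟩
      · by_cases hp : p ∈ s
        · have hA : pvPassA s ((c, p) :: rest) = ((pvPassA (PySem.Set.add s c) rest).1, true) := by
            simp [pvPassA, hp, hc]
          have hB : pvPassB s ((c, p) :: r') =
              ((pvPassB (PySem.Set.add s c) r').1, (pvPassB (PySem.Set.add s c) r').2.1, true) := by
            simp [pvPassB, hp, hc]
          have hrem' : pvRem (PySem.Set.add s c) rest r' :=
            pvRem_mono s _ rest r' hrem (fun x hx => by simp [PySem.Set.mem_add, hx])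
          obtain ⟨h1, h2, h3⟩ := ih r' (PySem.Set.add s c) hrem'
          rw [hA, hB]
          refine ⟨h1, rfl, ?_⟩
          refine pvRem.dropMem _ c p rest _ ?_ h3
          exact pvPassA_mem rest (PySem.Set.add s c) c (by simp [PySem.Set.mem_add])
        · have hA : pvPassA s ((c, p) :: rest) = pvPassA s rest := by
            have : ¬ (p ∈ s ∧ c ∉ s) := fun hh => hp hh.1
            simp [pvPassA, this]
          have hB : pvPassB s ((c, p) :: r') =
              ((pvPassB s r').1, (c, p) :: (pvPassB s r').2.1, (pvPassB s r').2.2) := by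
            simp [pvPassB, hp, hc]
          obtain ⟨h1, h2, h3⟩ := ih r' s hrem
          rw [hA, hB]
          exact ⟨h1, h2, pvRem.keep _ c p rest _ h3⟩
    | dropMem =>
      rename_i hc hrem
      have hA : pvPassA s ((c, p) :: rest) = pvPassA s rest := by
        have : ¬ (p ∈ s ∧ c ∉ s) := fun hh => hh.2 hc
        simp [pvPassA, this]
      obtain ⟨h1, h2, h3⟩ := ih r s hrem
      rw [hA]
      exact ⟨h1, h2, pvRem.dropMem _ c p rest _ (pvPassA_mem rest s c hc) h3⟩

-- B's per-key saturation over any pruned worklist view = the full-pass saturation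
theorem pvSatAgree (rel : List (String × String)) :
    ∀ (n : Nat) (r : List (String × String)) (s : List String),
    r.length ≤ n → pvRem s rel r →
    pvSatB s r = pvSatF rel s := by
  intro n
  induction n with
  | zero =>
    intro r s hlen hrem
    obtain ⟨h1, h2, h3⟩ := pvPassAgree rel r s hrem
    rcases hf : pvPassA s rel with ⟨s', flag⟩
    rw [hf] at h1 h2 h3
    dsimp only at h1 h2 h3
    rcases flag with _ | _
    · have hBeq : pvPassB s r = (s', (pvPassB s r).2.1, false) := by rw [← h1, ← h2]
      rw [pvSatB_of_false s s' r (pvPassB s r).2.1 hBeq, pvSatF_of_false rel s s' hf]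
    · exfalso
      have := (pvPassB_len r s).2 h2
      omega
  | succ n ihn =>
    intro r s hlen hrem
    obtain ⟨h1, h2, h3⟩ := pvPassAgree rel r s hrem
    rcases hf : pvPassA s rel with ⟨s', flag⟩
    rw [hf] at h1 h2 h3
    dsimp only at h1 h2 h3
    rcases flag with _ | _
    · have hBeq : pvPassB s r = (s', (pvPassB s r).2.1, false) := by rw [← h1, ← h2]
      rw [pvSatB_of_false s s' r (pvPassB s r).2.1 hBeq, pvSatF_of_false rel s s' hf]
    · have hBeq : pvPassB s r = (s', (pvPassB s r).2.1, true) := by rw [← h1, ← h2]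
      have hlt := (pvPassB_len r s).2 h2
      rw [pvSatB_of_true s s' r (pvPassB s r).2.1 hBeq, pvSatF_of_true rel s s' hf]
      exact ihn (pvPassB s r).2.1 s' (by omega) h3

-- per entry: B's whole per-key computation equals the full-pass saturation
theorem pvEntry_eq (rel : List (String × String)) (dd : List String) :
    pvSatB dd (rel.filter (fun cp => !decide (cp.1 ∈ dd))) = pvSatF rel dd := by
  exact pvSatAgree rel (rel.filter (fun cp => !decide (cp.1 ∈ dd))).length _ dd
    le_rfl (pvRem_filter dd rel)

-- ===== VERDICT (by name: the statement is the Claim_ definition above) =====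
theorem rel_descendants_spec : Claim_equal_rel_descendants := by
  intro rel desc _
  unfold Spec_rel_descendants rel_descendants rel_descendants_alt
  rw [pvLoopA_eq rel (pvPot rel (if desc.isEmpty then rel.map (fun cp => (cp.1, [cp.1])) else desc)) _ le_rfl]
  apply List.map_congr_left
  intro es _
  show (es.1, pvSatF rel es.2) = (es.1, pvSatB es.2 (rel.filter (fun cp => !decide (cp.1 ∈ es.2))))
  rw [pvEntry_eq rel es.2]
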